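-- pv_equiv track=rewrite | github.com/jsnjuan/Competitive-Programming | Google'sCodingCompetitions/CodeJam/2016/Round 1B/Practice/GettingtheDigits_11_12pts.py | calcula_num
-- ===== SOURCE A (Python) =====
-- def genera_contador(cad):
--     dic = {}
--     for l in cad:
--         dic[l] =  dic.get(l, 0) + 1
--     return dic
--
-- def calcula_num(cad):
--
--     ls_sol = []
--
--     dic_sol = {'Z':0 , 'W': 2, 'U': 4, 'X': 6, 'G': 8,
--                'O': 1, 'T': 3, 'F': 5, 'S': 7, 'E': 9}
--
--     contador = genera_contador(cad)
--
--     ls1 = [('Z', 'ZERO'), ('W', 'TWO'), ('U', 'FOUR'), ('X', 'SIX'),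
--            ('G', 'EIGHT'), ('O', 'ONE'), ('T', 'THREE'), ('F', 'FIVE'),
--            ('S', 'SEVEN'), ('E', 'NINE')]
--
--     for clave, letra in ls1:
--         if clave in contador and contador[clave] > 0:
--             veces = contador[clave]
--             ls_sol.extend([dic_sol[clave]] * veces)
--             for l in letra:
--                 contador[l] -= veces
--
--     ls_sol.sort()
--     return ls_sol
-- ===== SOURCE B (Python) =====
-- def calcula_num(cad):
--     # Closed form: each digit's multiplicity is determined directly by letter
--     # counts (Z,W,U,X,G are unique to their words; O,T,F,S,E after removing the
--     # contributions of those words), so no counter dict and no peeling loop.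
--     n0 = cad.count('Z')
--     n2 = cad.count('W')
--     n4 = cad.count('U')
--     n6 = cad.count('X')
--     n8 = cad.count('G')
--     n1 = max(cad.count('O') - n0 - n2 - n4, 0)
--     n3 = max(cad.count('T') - n2 - n8, 0)
--     n5 = max(cad.count('F') - n4, 0)
--     n7 = max(cad.count('S') - n6, 0)
--     n9 = max(cad.count('E') - n0 - n8 - n1 - 2 * n3 - n5 - 2 * n7, 0)
--     out = []
--     for d, k in enumerate([n0, n1, n2, n3, n4, n5, n6, n7, n8, n9]):
--         out.extend([d] * k)
--     return out
-- ===== Notes on version B (the rewrite author's own statement) =====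
-- stated objective: faster
-- what changed: B drops A's counter dict, sequential word-peeling loop with in-place letter subtraction, and final sort, and instead computes each digit's multiplicity by a closed-form expression over ten single-letter counts (unique letters Z,W,U,X,G directly; O,T,F,S,E after subtracting those words' contributions, clamped at 0), then emits the digits in ascending order.
import Mathlib
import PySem

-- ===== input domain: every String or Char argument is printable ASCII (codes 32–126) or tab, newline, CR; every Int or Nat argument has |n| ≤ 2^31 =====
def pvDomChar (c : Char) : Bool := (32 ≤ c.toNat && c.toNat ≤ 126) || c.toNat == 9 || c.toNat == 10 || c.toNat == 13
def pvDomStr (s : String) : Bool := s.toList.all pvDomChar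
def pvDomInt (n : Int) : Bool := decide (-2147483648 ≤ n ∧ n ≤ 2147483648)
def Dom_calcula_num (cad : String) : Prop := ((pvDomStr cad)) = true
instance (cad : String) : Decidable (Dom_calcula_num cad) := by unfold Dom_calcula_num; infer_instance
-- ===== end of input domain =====

-- B replaces A's counter-dict + peeling loop + sort by a closed form: each digit's
-- multiplicity is computed directly from letter counts; equivalence of the return value.

-- ===== PORT A =====
def genera_contador (cad : String) : PySem.Dict Char Int :=
  cad.toList.foldl (fun dic l => dic.insert l (dic.getD l 0 + 1)) PySem.Dict.empty

def calcula_num (cad : String) : List Int :=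
  let dic_sol : PySem.Dict Char Int :=
    PySem.Dict.ofList [('Z',0),('W',2),('U',4),('X',6),('G',8),('O',1),('T',3),('F',5),('S',7),('E',9)]
  let contador := genera_contador cad
  let ls1 : List (Char × String) :=
    [('Z',"ZERO"),('W',"TWO"),('U',"FOUR"),('X',"SIX"),('G',"EIGHT"),
     ('O',"ONE"),('T',"THREE"),('F',"FIVE"),('S',"SEVEN"),('E',"NINE")]
  let res := ls1.foldl (fun (st : List Int × PySem.Dict Char Int) kv =>
    if st.2.contains kv.1 ∧ st.2.getD kv.1 0 > 0 then
      let veces := st.2.getD kv.1 0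
      -- 'contador[l] -= veces': exact where the key is present (Python raises KeyError otherwise; such inputs are outside Pre_)
      (st.1 ++ List.replicate veces.toNat (dic_sol.getD kv.1 0),
       kv.2.toList.foldl (fun c l => c.insert l (c.getD l 0 - veces)) st.2)
    else st) ([], contador)
  PySem.List.sorted res.1 (fun x => x) false

-- ===== PORT B =====
def calcula_num_alt (cad : String) : List Int :=
  let n0 : Int := (PySem.Str.count cad "Z" : Int)
  let n2 : Int := (PySem.Str.count cad "W" : Int)
  let n4 : Int := (PySem.Str.count cad "U" : Int)
  let n6 : Int := (PySem.Str.count cad "X" : Int)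
  let n8 : Int := (PySem.Str.count cad "G" : Int)
  let n1 : Int := max ((PySem.Str.count cad "O" : Int) - n0 - n2 - n4) 0
  let n3 : Int := max ((PySem.Str.count cad "T" : Int) - n2 - n8) 0
  let n5 : Int := max ((PySem.Str.count cad "F" : Int) - n4) 0
  let n7 : Int := max ((PySem.Str.count cad "S" : Int) - n6) 0
  let n9 : Int := max ((PySem.Str.count cad "E" : Int) - n0 - n8 - n1 - 2 * n3 - n5 - 2 * n7) 0
  -- 'out.extend([d] * k)' over enumerate of the ten counts ([d] * k = [] for k ≤ 0)
  (PySem.List.enumerate [n0, n1, n2, n3, n4, n5, n6, n7, n8, n9] 0).foldl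
    (fun out dk => out ++ List.replicate dk.2.toNat dk.1) []

-- ===== PRECONDITION & SPEC =====
-- letter count and effective (post-subtraction) counts of the distinguishing letters
def pvN (l : List Char) (c : Char) : Int := (l.count c : Int)
def pvEO (l : List Char) : Int := pvN l 'O' - pvN l 'Z' - pvN l 'W' - pvN l 'U'
def pvET (l : List Char) : Int := pvN l 'T' - pvN l 'W' - pvN l 'G'
def pvEF (l : List Char) : Int := pvN l 'F' - pvN l 'U'
def pvES (l : List Char) : Int := pvN l 'S' - pvN l 'X'
def pvEE (l : List Char) : Int :=
  pvN l 'E' - pvN l 'Z' - pvN l 'G' - max (pvEO l) 0 - 2 * max (pvET l) 0 - max (pvEF l) 0 - 2 * max (pvES l) 0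

-- Pre_ excludes exactly the inputs on which A raises KeyError: some peel fires while a letter of its word is absent from the string.
def Pre_calcula_num (cad : String) : Prop :=
  (pvN cad.toList 'Z' > 0 → 'E' ∈ cad.toList ∧ 'R' ∈ cad.toList ∧ 'O' ∈ cad.toList) ∧
  (pvN cad.toList 'W' > 0 → 'T' ∈ cad.toList ∧ 'O' ∈ cad.toList) ∧
  (pvN cad.toList 'U' > 0 → 'F' ∈ cad.toList ∧ 'O' ∈ cad.toList ∧ 'R' ∈ cad.toList) ∧
  (pvN cad.toList 'X' > 0 → 'S' ∈ cad.toList ∧ 'I' ∈ cad.toList) ∧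
  (pvN cad.toList 'G' > 0 → 'E' ∈ cad.toList ∧ 'I' ∈ cad.toList ∧ 'H' ∈ cad.toList ∧ 'T' ∈ cad.toList) ∧
  (pvEO cad.toList > 0 → 'N' ∈ cad.toList ∧ 'E' ∈ cad.toList) ∧
  (pvET cad.toList > 0 → 'H' ∈ cad.toList ∧ 'R' ∈ cad.toList ∧ 'E' ∈ cad.toList) ∧
  (pvEF cad.toList > 0 → 'I' ∈ cad.toList ∧ 'V' ∈ cad.toList ∧ 'E' ∈ cad.toList) ∧
  (pvES cad.toList > 0 → 'E' ∈ cad.toList ∧ 'V' ∈ cad.toList ∧ 'N' ∈ cad.toList) ∧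
  (pvEE cad.toList > 0 → 'N' ∈ cad.toList ∧ 'I' ∈ cad.toList)
instance (cad : String) : Decidable (Pre_calcula_num cad) := by
  unfold Pre_calcula_num
  repeat' refine @instDecidableAnd _ _ ?_ ?_
  all_goals infer_instance

def pvWitness_calcula_num : String := "ONETWO"

def Spec_calcula_num (cad : String) (out : List Int) : Prop := out = calcula_num_alt cad
instance (cad : String) (out : List Int) : Decidable (Spec_calcula_num cad out) := by unfold Spec_calcula_num; infer_instance

-- ===== CLAIM =====
def Claim_equal_calcula_num : Prop := ∀ (cad : String), Dom_calcula_num cad → Pre_calcula_num cad → Spec_calcula_num cad (calcula_num cad)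

-- ===== LEMMAS AND PROOFS =====

-- Python str.count with a single-character needle is the character count (helper for B's port).
theorem count_go_single (c : Char) : ∀ (s : List Char) (fuel acc : Nat), s.length ≤ fuel →
    PySem.Chars.count.go [c] fuel s acc = acc + s.count c := by
  intro s
  induction s with
  | nil => intro fuel acc _; cases fuel <;> simp [PySem.Chars.count.go]
  | cons a t ih =>
    intro fuel acc h
    cases fuel with
    | zero => simp at h
    | succ f =>
      rw [PySem.Chars.count.go]
      by_cases hc : c = a
      · subst hc
        simp only [List.isPrefixOf, beq_self_eq_true, Bool.true_and,
          List.length_singleton, if_true, List.drop_succ_cons, List.drop_zero]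
        rw [ih f (acc+1) (by simpa using h)]
        simp
        omega
      · simp [List.isPrefixOf, Ne.symm hc, hc, ih f acc (by simpa using h)]

theorem str_count_single (s : String) (c : Char) (lit : String) (hl : lit.toList = [c]) :
    (PySem.Str.count s lit : Int) = (s.toList.count c : Int) := by
  have h : PySem.Chars.count s.toList [c] = s.toList.count c := by
    simp [PySem.Chars.count]
    simpa using count_go_single c s.toList s.toList.length 0 le_rfl
  simp only [PySem.Str.count_eq, hl]
  norm_cast

-- A-side machinery: fired amount of a peel (0 when the guard does not fire)
def pvV (c : PySem.Dict Char Int) (k : Char) : Nat :=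
  if c.getD k 0 > 0 then (c.getD k 0).toNat else 0

-- counter after one peel step
def pvSub (c : PySem.Dict Char Int) (k : Char) (w : String) : PySem.Dict Char Int :=
  if c.getD k 0 > 0 then
    w.toList.foldl (fun c' l => c'.insert l (c'.getD l 0 - c.getD k 0)) c
  else c

def pvDic (k : Char) : Int :=
  (PySem.Dict.ofList [('Z',(0:Int)),('W',2),('U',4),('X',6),('G',8),('O',1),('T',3),('F',5),('S',7),('E',9)]).getD k 0

def stepA (st : List Int × PySem.Dict Char Int) (kv : Char × String) : List Int × PySem.Dict Char Int :=
  (st.1 ++ List.replicate (pvV st.2 kv.1) (pvDic kv.1), pvSub st.2 kv.1 kv.2)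

-- B-side abstraction: the same peel on the VALUE FUNCTION, unconditional (max with 0)
def stepF (st : List Int × (Char → Int)) (kv : Char × String) : List Int × (Char → Int) :=
  (st.1 ++ List.replicate (max (st.2 kv.1) 0).toNat (pvDic kv.1),
   fun l => st.2 l - max (st.2 kv.1) 0 * (kv.2.toList.count l : Int))

lemma getD_pos_contains (c : PySem.Dict Char Int) (k : Char) (h : c.getD k 0 > 0) :
    c.contains k = true := by
  by_cases hc : c.contains k = true
  · exact hc
  · rw [PySem.Dict.getD_of_not_contains c 0 (by simpa using hc)] at h; omega

lemma A_step (st : List Int × PySem.Dict Char Int) (kv : Char × String) :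
    (if st.2.contains kv.1 ∧ st.2.getD kv.1 0 > 0 then
      (st.1 ++ List.replicate (st.2.getD kv.1 0).toNat
        ((PySem.Dict.ofList [('Z',(0:Int)),('W',2),('U',4),('X',6),('G',8),('O',1),('T',3),('F',5),('S',7),('E',9)]).getD kv.1 0),
       kv.2.toList.foldl (fun c l => c.insert l (c.getD l 0 - st.2.getD kv.1 0)) st.2)
    else st) = stepA st kv := by
  unfold stepA pvV pvSub pvDic
  by_cases h : st.2.getD kv.1 0 > 0
  · simp [h, getD_pos_contains _ _ h]
  · simp [h]

lemma subfold_getD (w : List Char) (c : PySem.Dict Char Int) (v : Int) (l : Char) :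
    (w.foldl (fun c' x => c'.insert x (c'.getD x 0 - v)) c).getD l 0
      = c.getD l 0 - v * (w.count l : Int) := by
  induction w generalizing c with
  | nil => simp
  | cons x xs ih =>
    simp only [List.foldl_cons]
    rw [ih]
    rw [PySem.Dict.getD_insert]
    by_cases h : l = x
    · subst h; simp; ring
    · simp [h, Ne.symm h]

lemma sim (pairs : List (Char × String)) :
    ∀ (acc : List Int) (d : PySem.Dict Char Int) (c : Char → Int),
      (∀ l, d.getD l 0 = c l) →
      (pairs.foldl stepA (acc, d)).1 = (pairs.foldl stepF (acc, c)).1 := by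
  induction pairs with
  | nil => intro acc d c _; rfl
  | cons kv rest ih =>
    intro acc d c h
    simp only [List.foldl_cons]
    have hv : pvV d kv.1 = (max (c kv.1) 0).toNat := by
      unfold pvV; rw [h]
      by_cases hp : c kv.1 > 0
      · simp [hp]; omega
      · simp [hp]; omega
    have hnew : ∀ l, (pvSub d kv.1 kv.2).getD l 0
        = c l - max (c kv.1) 0 * (kv.2.toList.count l : Int) := by
      intro l
      unfold pvSub; rw [h]
      by_cases hp : c kv.1 > 0
      · simp only [hp, if_true]
        rw [subfold_getD, h]
        have hm : max (c kv.1) 0 = c kv.1 := by omega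
        rw [hm]
      · simp only [hp, if_false]
        rw [h]
        have : max (c kv.1) 0 = 0 := by omega
        simp [this]
    have hfst : stepA (acc, d) kv = (acc ++ List.replicate (max (c kv.1) 0).toNat (pvDic kv.1), pvSub d kv.1 kv.2) := by
      unfold stepA; simp [hv]
    rw [hfst]
    exact ih _ _ _ hnew

lemma counter_getD (cad : String) (l : Char) :
    (genera_contador cad).getD l 0 = (cad.toList.count l : Int) := by
  unfold genera_contador
  rw [PySem.Dict.getD_foldl_insert_add_one]
  simp

-- max of a Nat cast with 0
lemma max_natCast_zero (n : Nat) : max ((n : Int)) 0 = (n : Int) :=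
  max_eq_left (Int.natCast_nonneg n)

lemma sorted_blocks (a0 a1 a2 a3 a4 a5 a6 a7 a8 a9 : Nat) :
    PySem.List.sorted
      (List.replicate a0 (0:Int) ++ (List.replicate a2 (2:Int) ++ (List.replicate a4 (4:Int) ++ (List.replicate a6 (6:Int) ++ (List.replicate a8 (8:Int) ++ (List.replicate a1 (1:Int) ++ (List.replicate a3 (3:Int) ++ (List.replicate a5 (5:Int) ++ (List.replicate a7 (7:Int) ++ (List.replicate a9 (9:Int))))))))))) (fun x => x) false
    = List.replicate a0 (0:Int) ++ (List.replicate a1 (1:Int) ++ (List.replicate a2 (2:Int) ++ (List.replicate a3 (3:Int) ++ (List.replicate a4 (4:Int) ++ (List.replicate a5 (5:Int) ++ (List.replicate a6 (6:Int) ++ (List.replicate a7 (7:Int) ++ (List.replicate a8 (8:Int) ++ (List.replicate a9 (9:Int)))))))))) := by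
  apply PySem.List.sorted_id_eq_of_perm_of_pairwise
  · refine List.perm_iff_count.mpr fun x => ?_
    simp only [List.count_append, List.count_replicate]
    ring
  · simp only [List.pairwise_append, List.mem_append, List.mem_replicate,
      List.pairwise_replicate]
    repeat' apply And.intro
    all_goals intros
    all_goals omega

theorem main_eq (cad : String) : calcula_num cad = calcula_num_alt cad := by
  unfold calcula_num calcula_num_alt
  dsimp only
  rw [PySem.List.foldl_congr_mem _ _ stepA _ (fun acc x _ => A_step acc x)]
  rw [sim _ [] (genera_contador cad) (fun l => (cad.toList.count l : Int)) (counter_getD cad)]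
  simp only [stepF, List.foldl_cons, List.foldl_nil, PySem.List.enumerate]
  simp only [str_count_single cad 'Z' "Z" rfl, str_count_single cad 'W' "W" rfl,
    str_count_single cad 'U' "U" rfl, str_count_single cad 'X' "X" rfl,
    str_count_single cad 'G' "G" rfl, str_count_single cad 'O' "O" rfl,
    str_count_single cad 'T' "T" rfl, str_count_single cad 'F' "F" rfl,
    str_count_single cad 'S' "S" rfl, str_count_single cad 'E' "E" rfl]
  simp only [show "ZERO".toList = ['Z','E','R','O'] from rfl,
    show "TWO".toList = ['T','W','O'] from rfl,
    show "FOUR".toList = ['F','O','U','R'] from rfl,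
    show "SIX".toList = ['S','I','X'] from rfl,
    show "EIGHT".toList = ['E','I','G','H','T'] from rfl,
    show "ONE".toList = ['O','N','E'] from rfl,
    show "THREE".toList = ['T','H','R','E','E'] from rfl,
    show "FIVE".toList = ['F','I','V','E'] from rfl,
    show "SEVEN".toList = ['S','E','V','E','N'] from rfl,
    show pvDic 'Z' = 0 from rfl, show pvDic 'W' = 2 from rfl, show pvDic 'U' = 4 from rfl,
    show pvDic 'X' = 6 from rfl, show pvDic 'G' = 8 from rfl, show pvDic 'O' = 1 from rfl,
    show pvDic 'T' = 3 from rfl, show pvDic 'F' = 5 from rfl, show pvDic 'S' = 7 from rfl,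
    show pvDic 'E' = 9 from rfl]
  norm_num [max_natCast_zero, List.count_cons, List.count_nil, List.append_assoc]
  rw [sorted_blocks]
  ring_nf

-- ===== VERDICT (by name: the statement is the Claim_ definition above) =====
theorem calcula_num_spec : Claim_equal_calcula_num := by
  intro cad _ _
  unfold Spec_calcula_num
  exact main_eq cad
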